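-- pv_equiv track=rewrite | github.com/vinayvobbili/security-ops-platform | my_bot/core/my_model.py | is_help_command
-- ===== SOURCE A (Python) =====
-- def is_help_command(query_text: str) -> bool:
--     """
--     Detect if user is asking for help with using the bot.
--
--     Args:
--         query_text: The user's query string
--
--     Returns:
--         bool: True if the query is a help command, False otherwise
--     """
--     query_lower = query_text.lower().strip()
--
--     # Direct help commands
--     help_phrases = [
--         'help', 'help me', 'how do i use', 'how to use',
--         'what can you do', 'what do you do', 'show commands',
--         'list commands', 'available commands', 'usage',
--         'how does this work', 'instructions'
--     ]
--
--     return any(phrase == query_lower or query_lower.startswith(phrase + ' ') or query_lower.endswith(' ' + phrase) for phrase in help_phrases)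
-- ===== SOURCE B (Python) =====
-- _PHRASES = frozenset(
--     "help|help me|how do i use|how to use|what can you do|what do you do|"
--     "show commands|list commands|available commands|usage|"
--     "how does this work|instructions".split('|'))
--
--
-- def is_help_command(query_text: str) -> bool:
--     q = query_text.lower().strip()
--     candidates = {q}
--     for i, ch in enumerate(q):
--         if ch == ' ':
--             candidates.add(q[:i])
--             candidates.add(q[i + 1:])
--     return not _PHRASES.isdisjoint(candidates)
-- ===== Notes on version B (the rewrite author's own statement) =====
-- stated objective: alternative
-- what changed: B stores the phrases as a single pipe-delimited string split once into a frozenset, builds the full candidate set (the stripped lowercased query plus its prefix before and suffix after each space) in a single pass over the query, and answers with one set-disjointness test, instead of A's scan over the phrase list with per-phrase equality/startswith/endswith checks.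
import Mathlib
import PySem

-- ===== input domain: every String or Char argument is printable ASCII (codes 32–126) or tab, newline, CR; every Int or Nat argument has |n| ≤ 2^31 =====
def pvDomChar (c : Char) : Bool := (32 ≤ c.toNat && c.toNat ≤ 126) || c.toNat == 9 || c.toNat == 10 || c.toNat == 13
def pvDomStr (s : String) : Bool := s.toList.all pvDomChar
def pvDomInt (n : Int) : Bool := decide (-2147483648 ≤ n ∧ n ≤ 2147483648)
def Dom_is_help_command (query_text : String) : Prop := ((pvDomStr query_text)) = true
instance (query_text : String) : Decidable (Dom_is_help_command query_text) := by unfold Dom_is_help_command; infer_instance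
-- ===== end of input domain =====

-- B stores the help phrases as one '|'-delimited string split once into a set, builds the full
-- candidate set (the query plus its prefix/suffix at every space) in one pass, and answers with a
-- single set-disjointness test; A scans the phrase list with per-phrase ==/startswith/endswith.
-- Objective: alternative decomposition (same cost at this size).

-- ===== PORT A =====
def pvHelpPhrases : List (List Char) :=
  ["help".toList, "help me".toList, "how do i use".toList, "how to use".toList,
   "what can you do".toList, "what do you do".toList, "show commands".toList,
   "list commands".toList, "available commands".toList, "usage".toList,
   "how does this work".toList, "instructions".toList]

def is_help_command (query_text : String) : Bool :=
  let query_lower := PySem.Chars.strip (PySem.Chars.lower query_text.toList)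
  pvHelpPhrases.any (fun phrase =>
    phrase == query_lower
      || PySem.Chars.startswith query_lower (phrase ++ [' '])
      || PySem.Chars.endswith query_lower (' ' :: phrase))

-- ===== PORT B =====
def pvPhraseSet : PySem.Set (List Char) :=
  PySem.Set.ofList
    (PySem.Chars.splitOn
      ("help|help me|how do i use|how to use|what can you do|what do you do|" ++
       "show commands|list commands|available commands|usage|" ++
       "how does this work|instructions").toList ['|'])

def is_help_command_alt (query_text : String) : Bool :=
  let q := PySem.Chars.strip (PySem.Chars.lower query_text.toList)
  let candidates :=
    (PySem.List.enumerate q 0).foldl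
      (fun s ic =>
        if ic.2 == ' ' then
          PySem.Set.add (PySem.Set.add s (PySem.List.slice q none (some ic.1)))
            (PySem.List.slice q (some (ic.1 + 1)) none)
        else s)
      (PySem.Set.ofList [q])
  !(PySem.Set.isdisjoint pvPhraseSet candidates)

-- ===== PRECONDITION & SPEC =====
def Spec_is_help_command (query_text : String) (out : Bool) : Prop := out = is_help_command_alt query_text
instance (query_text : String) (out : Bool) : Decidable (Spec_is_help_command query_text out) := by unfold Spec_is_help_command; infer_instance

-- ===== CLAIM (what is proved, stated in full; the proofs are below) =====
def Claim_equal_is_help_command : Prop := ∀ (query_text : String), Dom_is_help_command query_text → Spec_is_help_command query_text (is_help_command query_text)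

-- ===== LEMMAS AND PROOFS =====

-- B's stored set splits back to exactly A's phrase list (the 12 phrases are distinct).
set_option maxRecDepth 40000 in
theorem pvPhraseSet_eq : pvPhraseSet = pvHelpPhrases := by decide

-- Membership in B's candidate-building fold.
theorem pv_mem_fold (q : List Char) (l : List ((Int × Char))) (s0 : PySem.Set (List Char))
    (x : List Char) :
    x ∈ l.foldl
      (fun s ic =>
        if ic.2 == ' ' then
          PySem.Set.add (PySem.Set.add s (PySem.List.slice q none (some ic.1)))
            (PySem.List.slice q (some (ic.1 + 1)) none)
        else s) s0
    ↔ x ∈ s0 ∨ ∃ ic ∈ l, ic.2 = ' ' ∧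
        (x = PySem.List.slice q none (some ic.1) ∨
         x = PySem.List.slice q (some (ic.1 + 1)) none) := by
  induction l generalizing s0 with
  | nil => simp
  | cons hd tl ih =>
    simp only [List.foldl_cons, ih, List.mem_cons]
    by_cases hsp : hd.2 = ' '
    · simp [hsp, PySem.Set.mem_add, or_assoc]
    · simp [hsp]

-- "query_lower.startswith(phrase + ' ')" ↔ some space position cuts off exactly that phrase as a prefix.
theorem pv_startswith_space_iff (l p : List Char) :
    (p ++ [' ']) <+: l ↔ ∃ (k : Nat) (h : k < l.length), l[k] = ' ' ∧ l.take k = p := by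
  constructor
  · rintro ⟨t, ht⟩
    subst ht
    refine ⟨p.length, by simp, by simp, by simp⟩
  · rintro ⟨k, h, hsp, htake⟩
    refine ⟨l.drop (k + 1), ?_⟩
    conv_rhs => rw [← List.take_append_drop k l]
    rw [htake, List.drop_eq_getElem_cons h, hsp]
    simp

-- "query_lower.endswith(' ' + phrase)" ↔ some space position leaves exactly that phrase as a suffix.
theorem pv_endswith_space_iff (l p : List Char) :
    (' ' :: p) <:+ l ↔ ∃ (k : Nat) (h : k < l.length), l[k] = ' ' ∧ l.drop (k + 1) = p := by
  constructor
  · rintro ⟨t, ht⟩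
    subst ht
    refine ⟨t.length, by simp, by simp, ?_⟩
    rw [show t.length + 1 = (t ++ [' ']).length by simp,
      show t ++ ' ' :: p = (t ++ [' ']) ++ p by simp]
    simp
  · rintro ⟨k, h, hsp, hdrop⟩
    refine ⟨l.take k, ?_⟩
    conv_rhs => rw [← List.take_append_drop k l]
    rw [List.drop_eq_getElem_cons h, hsp, hdrop]

-- A phrase is in B's candidate set iff it matches q, or is q's prefix/suffix at some space.
theorem pv_mem_candidates (q p : List Char) :
    (p ∈ (PySem.List.enumerate q 0).foldl
      (fun s ic =>
        if ic.2 == ' ' then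
          PySem.Set.add (PySem.Set.add s (PySem.List.slice q none (some ic.1)))
            (PySem.List.slice q (some (ic.1 + 1)) none)
        else s) (PySem.Set.ofList [q]))
    ↔ p = q ∨ ∃ (k : Nat) (h : k < q.length), q[k] = ' ' ∧ (p = q.take k ∨ p = q.drop (k + 1)) := by
  rw [pv_mem_fold]
  constructor
  · rintro (hq | ⟨ic, hicmem, hsp, hx⟩)
    · exact Or.inl (by simpa [PySem.Set.mem_ofList] using hq)
    · obtain ⟨k, h, rfl⟩ := (PySem.List.mem_enumerate_iff _ _ _).mp hicmem
      refine Or.inr ⟨k, h, hsp, ?_⟩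
      rcases hx with hx | hx
      · left
        rw [hx, show (0 : Int) + (k : Int) = (k : Int) by ring, PySem.List.slice_to_natCast]
      · right
        rw [hx, show (0 : Int) + (k : Int) + 1 = ((k + 1 : Nat) : Int) by push_cast; ring,
          PySem.List.slice_from_natCast]
  · rintro (rfl | ⟨k, h, hsp, hx⟩)
    · exact Or.inl (by simp [PySem.Set.mem_ofList])
    · refine Or.inr ⟨((0 : Int) + k, q[k]), (PySem.List.mem_enumerate_iff _ _ _).mpr ⟨k, h, rfl⟩, hsp, ?_⟩
      rcases hx with rfl | rfl
      · left
        rw [show (0 : Int) + (k : Int) = (k : Int) by ring, PySem.List.slice_to_natCast]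
      · right
        rw [show (0 : Int) + (k : Int) + 1 = ((k + 1 : Nat) : Int) by push_cast; ring,
          PySem.List.slice_from_natCast]

-- ===== VERDICT (by name: the statement is the Claim_ definition above) =====
theorem is_help_command_spec : Claim_equal_is_help_command := by
  intro query_text _
  unfold Spec_is_help_command is_help_command is_help_command_alt
  set q := PySem.Chars.strip (PySem.Chars.lower query_text.toList) with hq
  rw [Bool.eq_iff_iff]
  rw [Bool.not_eq_true', ← Bool.not_eq_true, PySem.Set.isdisjoint_iff]
  rw [List.any_eq_true]
  simp only [pvPhraseSet_eq]
  push Not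
  constructor
  · rintro ⟨p, hp, hcase⟩
    refine ⟨p, hp, ?_⟩
    rw [pv_mem_candidates]
    simp only [Bool.or_eq_true, beq_iff_eq, PySem.Chars.startswith_iff,
      PySem.Chars.endswith_iff] at hcase
    rcases hcase with (rfl | hsw) | hew
    · exact Or.inl rfl
    · obtain ⟨k, h, hsp, htake⟩ := (pv_startswith_space_iff q p).mp hsw
      exact Or.inr ⟨k, h, hsp, Or.inl htake.symm⟩
    · obtain ⟨k, h, hsp, hdrop⟩ := (pv_endswith_space_iff q p).mp hew
      exact Or.inr ⟨k, h, hsp, Or.inr hdrop.symm⟩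
  · rintro ⟨p, hp, hmem⟩
    refine ⟨p, hp, ?_⟩
    rw [pv_mem_candidates] at hmem
    simp only [Bool.or_eq_true, beq_iff_eq, PySem.Chars.startswith_iff, PySem.Chars.endswith_iff]
    rcases hmem with rfl | ⟨k, h, hsp, hx | hx⟩
    · exact Or.inl (Or.inl rfl)
    · exact Or.inl (Or.inr ((pv_startswith_space_iff q p).mpr ⟨k, h, hsp, hx.symm⟩))
    · exact Or.inr ((pv_endswith_space_iff q p).mpr ⟨k, h, hsp, hx.symm⟩)
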